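-- pv_equiv track=rewrite | github.com/jeonghoj/algorithm-problems | python/programmers/binary_search/1_bruteforce.py | solution
-- ===== SOURCE A (Python) =====
-- def solution(budgets, M):
-- 	answer = 0
-- 	limit = M // len(budgets)
-- 	max_limit = max(budgets)
--
-- 	sum_max = 0
-- 	while limit < max_limit:
-- 		sum_temp = 0
-- 		for v in budgets:
-- 			sum_temp = sum_temp + (limit if v > limit else v)
--
-- 		if M > sum_temp > sum_max:
-- 			sum_max = sum_temp
-- 			answer = limit
--
-- 		limit = limit + 1
--
-- 	return answer
-- ===== SOURCE B (Python) =====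
-- def solution(budgets, M):
--     # Largest cap (from M // n up to, not including, max(budgets)) whose total
--     # capped payout is positive and below M; 0 if no such cap exists.
--     n = len(budgets)
--
--     def payout(cap):
--         return sum(min(b, cap) for b in budgets)
--
--     def least_cap(target):
--         # payout is nondecreasing in the cap: binary-search the smallest cap
--         # in [M // n, max(budgets)] whose payout reaches target.
--         lo, hi = M // n, max(budgets)
--         while lo < hi:
--             mid = (lo + hi) // 2
--             if payout(mid) < target:
--                 lo = mid + 1
--             else:
--                 hi = mid
--         return lo
--
--     hi_cap = least_cap(M) - 1  # largest cap with payout below M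
--     lo_cap = least_cap(1)      # smallest cap with positive payout
--     return hi_cap if lo_cap <= hi_cap else 0
-- ===== Notes on version B (the rewrite author's own statement) =====
-- stated objective: faster
-- what changed: Replaces A's linear scan over every candidate cap between M//len(budgets) and max(budgets) with two binary searches (the capped payout is monotone in the cap) that locate the ends of the feasible cap interval and return its top; Pre_ only excludes the empty list, on which A raises ZeroDivisionError.
import Mathlib
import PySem

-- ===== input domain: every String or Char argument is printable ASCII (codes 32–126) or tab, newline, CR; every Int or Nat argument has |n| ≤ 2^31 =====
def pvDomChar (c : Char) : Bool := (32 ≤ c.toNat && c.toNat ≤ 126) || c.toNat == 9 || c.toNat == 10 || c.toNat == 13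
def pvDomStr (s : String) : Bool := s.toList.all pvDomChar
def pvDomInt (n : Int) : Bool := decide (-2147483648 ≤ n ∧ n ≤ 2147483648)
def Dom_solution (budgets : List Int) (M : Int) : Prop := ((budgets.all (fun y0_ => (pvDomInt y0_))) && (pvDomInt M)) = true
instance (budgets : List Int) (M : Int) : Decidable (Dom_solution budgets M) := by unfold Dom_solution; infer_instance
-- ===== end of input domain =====

-- B replaces A's linear scan over every candidate cap with two binary searches
-- (the capped payout is monotone in the cap) for the ends of the feasible cap
-- interval, returning its top: faster.

-- ===== PORT A =====
-- inner 'for v in budgets' accumulation of A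
def sumTempA (budgets : List Int) (limit : Int) : Int :=
  budgets.foldl (fun s v => s + (if v > limit then limit else v)) 0

-- A's 'while limit < max_limit' loop, state (limit, answer, sum_max)
def solutionLoop (budgets : List Int) (maxLimit M limit answer sumMax : Int) : Int :=
  if limit < maxLimit then
    let s := sumTempA budgets limit
    if M > s ∧ s > sumMax then
      solutionLoop budgets maxLimit M (limit + 1) limit s
    else
      solutionLoop budgets maxLimit M (limit + 1) answer sumMax
  else answer
termination_by (maxLimit - limit).toNat
decreasing_by all_goals omega

def solution (budgets : List Int) (M : Int) : Int :=
  solutionLoop budgets ((PySem.List.max? budgets (fun y => y)).getD 0) M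
    (PySem.Int.floordiv M budgets.length) 0 0

-- ===== PORT B =====
-- payout(cap) = sum(min(b, cap) for b in budgets)
def payoutB (budgets : List Int) (cap : Int) : Int :=
  (budgets.map (fun b => min b cap)).sum

-- the 'while lo < hi' loop of least_cap
def leastCapLoop (budgets : List Int) (target lo hi : Int) : Int :=
  if lo < hi then
    let mid := PySem.Int.floordiv (lo + hi) 2
    if payoutB budgets mid < target then leastCapLoop budgets target (mid + 1) hi
    else leastCapLoop budgets target lo mid
  else lo
termination_by (hi - lo).toNat
decreasing_by
  · have h := PySem.Int.floordiv_two_mid_bounds (le_of_lt (by assumption : lo < hi))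
    omega
  · have h1 : PySem.Int.floordiv (lo + hi) 2 < hi :=
      (PySem.Int.floordiv_lt_iff_lt_mul (by omega)).mpr (by omega)
    have h2 := PySem.Int.floordiv_two_mid_bounds (le_of_lt (by assumption : lo < hi))
    omega

-- least_cap(target): smallest cap in [M // n, max(budgets)] whose payout reaches target
def leastCap (budgets : List Int) (M target : Int) : Int :=
  leastCapLoop budgets target (PySem.Int.floordiv M budgets.length)
    ((PySem.List.max? budgets (fun y => y)).getD 0)

def solution_alt (budgets : List Int) (M : Int) : Int :=
  let hiCap := leastCap budgets M M - 1
  let loCap := leastCap budgets M 1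
  if loCap ≤ hiCap then hiCap else 0

-- ===== PRECONDITION & SPEC =====
-- A raises ZeroDivisionError (M // len) and ValueError (max) on an empty list.
def Pre_solution (budgets : List Int) (M : Int) : Prop := budgets ≠ []
instance (budgets : List Int) (M : Int) : Decidable (Pre_solution budgets M) := by
  unfold Pre_solution; infer_instance

def pvWitness_solution : List Int × Int := ([1, 2, 9], 8)

def Spec_solution (budgets : List Int) (M : Int) (out : Int) : Prop := out = solution_alt budgets M
instance (budgets : List Int) (M : Int) (out : Int) : Decidable (Spec_solution budgets M out) := by unfold Spec_solution; infer_instance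

-- ===== CLAIM (what is proved, stated in full; the proofs are below) =====
def Claim_equal_solution : Prop := ∀ (budgets : List Int) (M : Int), Dom_solution budgets M → Pre_solution budgets M → Spec_solution budgets M (solution budgets M)

-- ===== LEMMAS AND PROOFS =====

-- the two sum helpers compute the same value
theorem sumTempA_eq (budgets : List Int) (lim : Int) :
    sumTempA budgets lim = payoutB budgets lim := by
  have key : ∀ (l : List Int) (a : Int),
      l.foldl (fun s v => s + (if v > lim then lim else v)) a = a + (l.map (fun v => min v lim)).sum := by
    intro l
    induction l with
    | nil => intro a; simp
    | cons x t ih =>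
        intro a
        simp only [List.foldl_cons, List.map_cons, List.sum_cons, ih]
        have : (if x > lim then lim else x) = min x lim := by
          split_ifs with h <;> omega
        rw [this]; ring
  simpa [sumTempA, payoutB] using key budgets 0

-- payout is monotone in the cap
theorem payoutB_mono (budgets : List Int) {a b : Int} (h : a ≤ b) :
    payoutB budgets a ≤ payoutB budgets b := by
  induction budgets with
  | nil => simp [payoutB]
  | cons x t ih =>
      simp only [payoutB, List.map_cons, List.sum_cons] at *
      have : min x a ≤ min x b := by omega
      omega

-- payout is strictly increasing below an element of the list
theorem payoutB_strict (budgets : List Int) {m lim : Int} (hmem : m ∈ budgets)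
    (h : lim < m) : payoutB budgets lim < payoutB budgets (lim + 1) := by
  induction budgets with
  | nil => cases hmem
  | cons x t ih =>
      simp only [payoutB, List.map_cons, List.sum_cons] at *
      rcases List.mem_cons.mp hmem with hx | ht
      · have h1 : min x lim < min x (lim + 1) := by omega
        have h2 : (t.map (fun v => min v lim)).sum ≤ (t.map (fun v => min v (lim + 1))).sum := by
          have := payoutB_mono t (a := lim) (b := lim + 1) (by omega)
          simpa [payoutB] using this
        omega
      · have h1 := ih ht
        have h2 : min x lim ≤ min x (lim + 1) := by omega
        omega

-- characterisation of the binary-search loop for an arbitrary target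
theorem leastCapLoop_char (budgets : List Int) (t : Int) :
    ∀ lo hi : Int, lo ≤ hi →
      lo ≤ leastCapLoop budgets t lo hi ∧ leastCapLoop budgets t lo hi ≤ hi ∧
      (∀ L, lo ≤ L → L < leastCapLoop budgets t lo hi → payoutB budgets L < t) ∧
      (leastCapLoop budgets t lo hi < hi → t ≤ payoutB budgets (leastCapLoop budgets t lo hi)) := by
  intro lo hi
  induction hn : (hi - lo).toNat using Nat.strong_induction_on generalizing lo hi with
  | _ n ih =>
    intro hle
    by_cases hlt : lo < hi
    · rw [leastCapLoop, if_pos hlt]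
      set mid := PySem.Int.floordiv (lo + hi) 2 with hmid
      have hb := PySem.Int.floordiv_two_mid_bounds (le_of_lt hlt)
      have hmidlt : mid < hi := (PySem.Int.floordiv_lt_iff_lt_mul (by omega)).mpr (by omega)
      rw [← hmid] at hb
      by_cases hc : payoutB budgets mid < t
      · rw [if_pos hc]
        obtain ⟨ih1, ih2, ih3, ih4⟩ :=
          ih (hi - (mid + 1)).toNat (by omega) (mid + 1) hi rfl (by omega)
        refine ⟨by omega, ih2, ?_, ih4⟩
        intro L hL1 hL2
        by_cases hLm : L ≤ mid
        · exact lt_of_le_of_lt (payoutB_mono budgets hLm) hc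
        · exact ih3 L (by omega) hL2
      · rw [if_neg hc]
        obtain ⟨ih1, ih2, ih3, ih4⟩ :=
          ih (mid - lo).toNat (by omega) lo mid rfl (by omega)
        refine ⟨ih1, by omega, ih3, ?_⟩
        intro hrh
        by_cases hrm : leastCapLoop budgets t lo mid < mid
        · exact ih4 hrm
        · have : leastCapLoop budgets t lo mid = mid := by omega
          rw [this]; omega
    · rw [leastCapLoop, if_neg hlt]
      exact ⟨le_refl _, hle, fun L h1 h2 => absurd (lt_of_le_of_lt h1 h2) (lt_irrefl _),
             fun h => absurd h (by omega)⟩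

-- A's scanning loop, related to the target-M binary-search result r
theorem solutionLoop_char (budgets : List Int) (maxLim M start r : Int)
    (hmem : maxLim ∈ budgets)
    (hr1 : start ≤ r) (hr2 : r ≤ maxLim)
    (hr3 : ∀ L, start ≤ L → L < r → payoutB budgets L < M)
    (hr4 : r < maxLim → M ≤ payoutB budgets r) :
    ∀ lim answer sumMax : Int, start ≤ lim → lim ≤ maxLim →
      (sumMax = 0 ∨ (0 < sumMax ∧ sumMax < payoutB budgets lim)) →
      solutionLoop budgets maxLim M lim answer sumMax =
        if lim ≤ r - 1 ∧ 0 < payoutB budgets (r - 1) then r - 1 else answer := by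
  intro lim answer sumMax
  induction hn : (maxLim - lim).toNat using Nat.strong_induction_on
      generalizing lim answer sumMax with
  | _ n ih =>
    intro hs hle hsm
    by_cases hlt : lim < maxLim
    · rw [solutionLoop, if_pos hlt]
      simp only [sumTempA_eq]
      have hstrict : payoutB budgets lim < payoutB budgets (lim + 1) :=
        payoutB_strict budgets hmem hlt
      have hcond : (M > payoutB budgets lim ∧ payoutB budgets lim > sumMax) ↔
          (payoutB budgets lim < M ∧ 0 < payoutB budgets lim) := by
        rcases hsm with h0 | ⟨h1, h2⟩ <;> constructor <;> intro ⟨a, b⟩ <;>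
          exact ⟨by omega, by omega⟩
      by_cases hg : payoutB budgets lim < M ∧ 0 < payoutB budgets lim
      · rw [if_pos (hcond.mpr hg)]
        rw [ih (maxLim - (lim + 1)).toNat (by omega) (lim + 1) lim (payoutB budgets lim)
              rfl (by omega) (by omega) (Or.inr ⟨hg.2, hstrict⟩)]
        by_cases h1 : lim + 1 ≤ r - 1 ∧ 0 < payoutB budgets (r - 1)
        · rw [if_pos h1, if_pos ⟨by omega, h1.2⟩]
        · rw [if_neg h1]
          by_cases h2 : lim ≤ r - 1 ∧ 0 < payoutB budgets (r - 1)
          · -- forced lim = r - 1, and lim is good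
            rw [if_pos h2]
            omega
          · exfalso
            have hlimr : lim < r := by
              by_contra hge
              have hub := hr4 (by omega)
              have hmo := payoutB_mono budgets (show r ≤ lim by omega)
              omega
            have hmo := payoutB_mono budgets (show lim ≤ r - 1 by omega)
            exact h2 ⟨by omega, by omega⟩
      · rw [if_neg (fun hc => hg (hcond.mp hc))]
        rw [ih (maxLim - (lim + 1)).toNat (by omega) (lim + 1) answer sumMax
              rfl (by omega) (by omega) (by omega)]
        by_cases h1 : lim + 1 ≤ r - 1 ∧ 0 < payoutB budgets (r - 1)
        · rw [if_pos h1, if_pos ⟨by omega, h1.2⟩]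
        · rw [if_neg h1]
          by_cases h2 : lim ≤ r - 1 ∧ 0 < payoutB budgets (r - 1)
          · -- lim = r - 1 and good, contradicting ¬hg
            exfalso
            have hlimr : lim = r - 1 := by omega
            have : payoutB budgets lim < M := hr3 lim hs (by omega)
            exact hg ⟨this, by rw [hlimr]; exact h2.2⟩
          · rw [if_neg h2]
    · rw [solutionLoop, if_neg hlt]
      have hml : lim = maxLim := by omega
      by_cases h2 : lim ≤ r - 1 ∧ 0 < payoutB budgets (r - 1)
      · exact absurd h2.1 (by omega)
      · rw [if_neg h2]

-- ===== VERDICT (by name: the statement is the Claim_ definition above) =====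
theorem solution_spec : Claim_equal_solution := by
  intro budgets M _ hpre
  unfold Spec_solution
  obtain ⟨m, hm⟩ : ∃ m, PySem.List.max? budgets (fun y => y) = some m := by
    cases h : PySem.List.max? budgets (fun y => y) with
    | none => exact absurd ((PySem.List.max?_eq_none_iff budgets (fun y => y)).mp h) hpre
    | some m => exact ⟨m, rfl⟩
  have hmem : m ∈ budgets := PySem.List.max?_mem hm
  set start := PySem.Int.floordiv M budgets.length with hstart
  unfold solution solution_alt leastCap
  rw [hm]
  simp only [Option.getD_some, ← hstart]
  by_cases hlt : start < m
  · obtain ⟨hr1, hr2, hr3, hr4⟩ := leastCapLoop_char budgets M start m (le_of_lt hlt)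
    obtain ⟨hl1, hl2, hl3, hl4⟩ := leastCapLoop_char budgets 1 start m (le_of_lt hlt)
    set r := leastCapLoop budgets M start m with hr
    set l := leastCapLoop budgets 1 start m with hl
    rw [solutionLoop_char budgets m M start r hmem hr1 hr2 hr3 hr4 start 0 0
          (le_refl _) (le_of_lt hlt) (Or.inl rfl)]
    by_cases hc : l ≤ r - 1
    · have hlm : l < m := by omega
      have h1 : (1 : Int) ≤ payoutB budgets l := hl4 hlm
      have h2 : payoutB budgets l ≤ payoutB budgets (r - 1) := payoutB_mono budgets hc
      rw [if_pos ⟨by omega, by omega⟩, if_pos hc]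
    · rw [if_neg hc]
      by_cases hd : start ≤ r - 1 ∧ 0 < payoutB budgets (r - 1)
      · exfalso
        have := hl3 (r - 1) hd.1 (by omega)
        omega
      · rw [if_neg hd]
  · rw [solutionLoop, if_neg hlt, leastCapLoop, if_neg hlt, leastCapLoop, if_neg hlt]
    rw [if_neg (by omega)]
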